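-- pv_equiv track=rewrite | github.com/deeiqh/sc | pre_por_partes.py | a_mayuscula
-- ===== SOURCE A (Python) =====
-- def a_mayuscula(cad):
-- 	texto_claro = ""
-- 	letras = ['a','b','c','d','e','f','g','i','l','m','n','o','p','q','r','s','t','v','x','z']
-- 	for c in cad:
-- 		if c in letras:
-- 			texto_claro += chr(ord(c)-32)
-- 		else:
-- 			texto_claro += c
-- 	return texto_claro
-- ===== SOURCE B (Python) =====
-- def a_mayuscula(cad):
--     letras = ['a','b','c','d','e','f','g','i','l','m','n','o','p','q','r','s','t','v','x','z']
--     tabla = str.maketrans({c: chr(ord(c) - 32) for c in letras})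
--     return cad.translate(tabla)
-- ===== Notes on version B (the rewrite author's own statement) =====
-- stated objective: idiomatic
-- what changed: Replaced the per-character loop with list membership test and string concatenation by a translation table built once with str.maketrans and applied in a single cad.translate call.
import Mathlib
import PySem

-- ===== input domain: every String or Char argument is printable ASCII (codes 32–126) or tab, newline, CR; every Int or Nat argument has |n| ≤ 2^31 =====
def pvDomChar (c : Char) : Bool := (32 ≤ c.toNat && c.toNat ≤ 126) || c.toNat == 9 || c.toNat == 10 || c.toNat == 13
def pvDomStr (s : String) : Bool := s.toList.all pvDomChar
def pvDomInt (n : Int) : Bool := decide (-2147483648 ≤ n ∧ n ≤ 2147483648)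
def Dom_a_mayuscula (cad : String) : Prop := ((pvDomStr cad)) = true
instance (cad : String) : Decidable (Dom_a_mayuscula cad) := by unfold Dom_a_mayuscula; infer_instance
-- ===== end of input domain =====

-- B replaces A's per-character membership loop by a translation table built once and applied in one pass (idiomatic; return value only, no mutation involved).

-- ===== PORT A =====
-- the literal list `letras` of A
def pvLetras : List Char :=
  ['a','b','c','d','e','f','g','i','l','m','n','o','p','q','r','s','t','v','x','z']

def a_mayuscula (cad : String) : String :=
  -- texto_claro = ""; for c in cad: append chr(ord(c)-32) if c in letras else c
  cad.toList.foldl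
    (fun texto_claro c =>
      if c ∈ pvLetras then
        texto_claro ++ String.singleton (Char.ofNat (c.toNat - 32))
      else
        texto_claro ++ String.singleton c)
    ""

-- ===== PORT B =====
-- tabla = str.maketrans({c: chr(ord(c)-32) for c in letras}) — built once as an association list
def pvTabla : List (Char × Char) :=
  pvLetras.map (fun c => (c, Char.ofNat (c.toNat - 32)))

-- cad.translate(tabla): map each character through the table, identity when absent
def a_mayuscula_alt (cad : String) : String :=
  String.ofList (cad.toList.map (fun c => ((pvTabla.lookup c).getD c)))

-- ===== PRECONDITION & SPEC =====
def Spec_a_mayuscula (cad : String) (out : String) : Prop := out = a_mayuscula_alt cad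
instance (cad : String) (out : String) : Decidable (Spec_a_mayuscula cad out) := by unfold Spec_a_mayuscula; infer_instance

-- ===== CLAIM (what is proved, stated in full; the proofs are below) =====
def Claim_equal_a_mayuscula : Prop := ∀ (cad : String), Dom_a_mayuscula cad → Spec_a_mayuscula cad (a_mayuscula cad)

-- ===== LEMMAS AND PROOFS =====

-- per-character agreement between A's branch and B's table lookup
theorem pv_char_eq (c : Char) :
    (if c ∈ pvLetras then String.singleton (Char.ofNat (c.toNat - 32))
     else String.singleton c)
      = String.singleton ((pvTabla.lookup c).getD c) := by
  by_cases h : c ∈ pvLetras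
  · fin_cases h <;> rfl
  · simp only [List.mem_cons, List.not_mem_nil, or_false, pvLetras] at h
    push Not at h
    obtain ⟨h1,h2,h3,h4,h5,h6,h7,h8,h9,h10,h11,h12,h13,h14,h15,h16,h17,h18,h19,h20⟩ := h
    simp [pvLetras, pvTabla, List.lookup, beq_eq_false_iff_ne.mpr h1, beq_eq_false_iff_ne.mpr h2, beq_eq_false_iff_ne.mpr h3, beq_eq_false_iff_ne.mpr h4, beq_eq_false_iff_ne.mpr h5, beq_eq_false_iff_ne.mpr h6, beq_eq_false_iff_ne.mpr h7, beq_eq_false_iff_ne.mpr h8, beq_eq_false_iff_ne.mpr h9, beq_eq_false_iff_ne.mpr h10, beq_eq_false_iff_ne.mpr h11, beq_eq_false_iff_ne.mpr h12, beq_eq_false_iff_ne.mpr h13, beq_eq_false_iff_ne.mpr h14, beq_eq_false_iff_ne.mpr h15, beq_eq_false_iff_ne.mpr h16, beq_eq_false_iff_ne.mpr h17, beq_eq_false_iff_ne.mpr h18, beq_eq_false_iff_ne.mpr h19, beq_eq_false_iff_ne.mpr h20]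
    intro hc
    tauto

theorem pv_foldl_eq (l : List Char) (s : String) :
    l.foldl
      (fun texto_claro c =>
        if c ∈ pvLetras then
          texto_claro ++ String.singleton (Char.ofNat (c.toNat - 32))
        else
          texto_claro ++ String.singleton c)
      s
      = s ++ String.ofList (l.map (fun c => ((pvTabla.lookup c).getD c))) := by
  induction l generalizing s with
  | nil => simp
  | cons c cs ih =>
    simp only [List.foldl_cons, List.map_cons]
    rw [show (if c ∈ pvLetras then s ++ String.singleton (Char.ofNat (c.toNat - 32))
          else s ++ String.singleton c)
        = s ++ ((if c ∈ pvLetras then String.singleton (Char.ofNat (c.toNat - 32))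
          else String.singleton c)) from by split <;> rfl]
    rw [pv_char_eq, ih]
    apply String.ext
    simp

-- ===== VERDICT (by name: the statement is the Claim_ definition above) =====
theorem a_mayuscula_spec : Claim_equal_a_mayuscula := by
  intro cad _
  unfold Spec_a_mayuscula a_mayuscula a_mayuscula_alt
  rw [pv_foldl_eq]
  apply String.ext
  simp
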